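-- pv_equiv track=rewrite | github.com/finyorko/longcli-bench | scripts_python/longcli_aggregate_results.py | _iter_agent_models
-- ===== SOURCE A (Python) =====
-- from typing import Any, Iterable
--
-- AGENT_SORT_ORDER = ["codex", "claude-code", "openhands"]
--
-- def _sort_agents(agents: Iterable[str]) -> list[str]:
--     order_map = {name: idx for idx, name in enumerate(AGENT_SORT_ORDER)}
--     return sorted(agents, key=lambda name: (order_map.get(name, 999), name))
--
-- def _iter_agent_models(summary: dict[str, Any]) -> Iterable[tuple[str, str, dict[str, Any]]]:
--     for agent in _sort_agents(summary.keys()):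
--         models = summary.get(agent)
--         if not isinstance(models, dict):
--             continue
--         for model in sorted(models.keys()):
--             model_data = models.get(model)
--             if isinstance(model_data, dict):
--                 yield agent, model, model_data
-- ===== SOURCE B (Python) =====
-- AGENT_SORT_ORDER = ["codex", "claude-code", "openhands"]
--
-- def _iter_agent_models(summary):
--     # Flatten first, then sort ONCE by the composite key (rank, agent, model).
--     order_map = {name: idx for idx, name in enumerate(AGENT_SORT_ORDER)}
--     triples = []
--     for agent, models in summary.items():
--         if not isinstance(models, dict):
--             continue
--         for model, model_data in models.items():
--             if isinstance(model_data, dict):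
--                 triples.append((agent, model, model_data))
--     triples.sort(key=lambda t: (order_map.get(t[0], 999), t[0], t[1]))
--     yield from triples
-- ===== Notes on version B (the rewrite author's own statement) =====
-- stated objective: alternative
-- what changed: A sorts the agents and then sorts each agent's model keys separately, yielding nested; B collects all (agent, model, data) triples in one flat pass and sorts that flat list once by the composite key (agent rank, agent, model).
import Mathlib
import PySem

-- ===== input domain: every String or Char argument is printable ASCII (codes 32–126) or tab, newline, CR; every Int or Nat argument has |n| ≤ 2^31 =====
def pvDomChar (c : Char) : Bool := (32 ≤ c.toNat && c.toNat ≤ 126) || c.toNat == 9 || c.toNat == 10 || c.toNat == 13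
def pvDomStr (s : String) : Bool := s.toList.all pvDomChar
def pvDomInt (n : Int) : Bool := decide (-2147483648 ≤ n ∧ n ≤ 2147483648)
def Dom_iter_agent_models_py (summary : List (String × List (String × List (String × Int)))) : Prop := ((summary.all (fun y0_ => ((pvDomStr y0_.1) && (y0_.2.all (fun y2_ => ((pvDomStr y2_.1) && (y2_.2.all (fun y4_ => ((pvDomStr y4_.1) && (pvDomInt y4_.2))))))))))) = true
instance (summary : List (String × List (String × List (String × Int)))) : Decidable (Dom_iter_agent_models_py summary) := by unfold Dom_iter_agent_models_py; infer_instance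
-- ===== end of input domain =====

-- B flattens all (agent, model, data) triples first and sorts once by the composite
-- key (agent rank, agent, model), instead of A's nested per-agent sorting. Same values proved equal.

-- ===== PORT A =====
def pvAgentSortOrder : List String := ["codex", "claude-code", "openhands"]

-- order_map = {name: idx for idx, name in enumerate(AGENT_SORT_ORDER)}
def pvOrderMap : PySem.Dict String Int :=
  PySem.Dict.ofList ((PySem.List.enumerate pvAgentSortOrder 0).map (fun p => (p.2, p.1)))

-- order_map.get(name, 999)
def pvRank (name : String) : Int := pvOrderMap.getD name 999

-- the Python tuple key (order_map.get(name, 999), name), with Python's tuple (lexicographic) order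
def pvAgentKey (name : String) : Int ×ₗ String := toLex (pvRank name, name)

-- _sort_agents
def pvSortAgents (agents : List String) : List String :=
  PySem.List.sorted agents pvAgentKey

def iter_agent_models_py (summary : List (String × List (String × List (String × Int)))) : List (String × String × (List (String × Int))) :=
  let d := PySem.Dict.ofList summary
  (pvSortAgents d.keys).foldl (fun acc agent =>
    match d.get? agent with
    | none => acc            -- summary.get(agent) not a dict: continue (unreachable here)
    | some models =>
      let md := PySem.Dict.ofList models
      (PySem.List.sorted md.keys (fun m => m)).foldl (fun acc2 model =>
        match md.get? model with
        | none => acc2       -- models.get(model) not a dict: skip (unreachable here)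
        | some data => acc2 ++ [(agent, model, data)]) acc) []

-- ===== PORT B =====
-- the Python tuple key (order_map.get(t[0], 999), t[0], t[1]) with Python's tuple order
def pvTripleKey (t : String × String × (List (String × Int))) : Int ×ₗ Lex (String × String) :=
  toLex (pvRank t.1, toLex (t.1, t.2.1))

def iter_agent_models_py_alt (summary : List (String × List (String × List (String × Int)))) : List (String × String × (List (String × Int))) :=
  let d := PySem.Dict.ofList summary
  let triples := d.items.foldl (fun acc p =>
    acc ++ (PySem.Dict.ofList p.2).items.map (fun q => (p.1, q.1, q.2))) []
  PySem.List.sorted triples pvTripleKey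

-- ===== PRECONDITION & SPEC =====
def Spec_iter_agent_models_py (summary : List (String × List (String × List (String × Int)))) (out : List (String × String × (List (String × Int)))) : Prop := out = iter_agent_models_py_alt summary
instance (summary : List (String × List (String × List (String × Int)))) (out : List (String × String × (List (String × Int)))) : Decidable (Spec_iter_agent_models_py summary out) := by unfold Spec_iter_agent_models_py; infer_instance

-- ===== CLAIM (what is proved, stated in full; the proofs are below) =====
def Claim_equal_iter_agent_models_py : Prop := ∀ (summary : List (String × List (String × List (String × Int)))), Dom_iter_agent_models_py summary → Spec_iter_agent_models_py summary (iter_agent_models_py summary)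

-- ===== LEMMAS AND PROOFS =====

-- the per-agent block in A-normal form
def pvBlk (d : PySem.Dict String (List (String × List (String × Int)))) (a : String) : List (String × String × (List (String × Int))) :=
  (PySem.List.sorted (PySem.Dict.ofList (d.getD a [])).keys (fun m => m)).map
    (fun m => (a, m, (PySem.Dict.ofList (d.getD a [])).getD m []))

-- the per-agent block of the flat pass (unsorted models)
def pvBlk0 (d : PySem.Dict String (List (String × List (String × Int)))) (a : String) : List (String × String × (List (String × Int))) :=
  (PySem.Dict.ofList (d.getD a [])).keys.map
    (fun m => (a, m, (PySem.Dict.ofList (d.getD a [])).getD m []))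

theorem pv_get?_of_mem_keys {κ ν : Type} [BEq κ] [LawfulBEq κ] (d : PySem.Dict κ ν) (k : κ)
    (dflt : ν) (h : k ∈ d.keys) : d.get? k = some (d.getD k dflt) := by
  rcases ho : d.get? k with _ | v
  · exact absurd ((PySem.Dict.get?_eq_none_iff_not_mem_keys d k).mp ho) (by simpa using h)
  · rw [PySem.Dict.getD_of_get?_eq_some d dflt ho]

theorem pvA_eq (summary : List (String × List (String × List (String × Int)))) :
    iter_agent_models_py summary =
      (pvSortAgents (PySem.Dict.ofList summary).keys).flatMap (pvBlk (PySem.Dict.ofList summary)) := by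
  show ((pvSortAgents (PySem.Dict.ofList summary).keys).foldl (fun acc agent =>
    match (PySem.Dict.ofList summary).get? agent with
    | none => acc
    | some models =>
      (PySem.List.sorted (PySem.Dict.ofList models).keys (fun m => m)).foldl (fun acc2 model =>
        match (PySem.Dict.ofList models).get? model with
        | none => acc2
        | some data => acc2 ++ [(agent, model, data)]) acc) []) = _
  rw [PySem.List.foldl_congr_mem _ _
      (fun acc agent => acc ++ pvBlk (PySem.Dict.ofList summary) agent) _ ?_]
  · rw [PySem.List.foldl_append_eq_flatMap]
    simp
  · intro acc a ha
    have ha' : a ∈ (PySem.Dict.ofList summary).keys :=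
      (PySem.List.mem_sorted _ _ _ _).mp ha
    simp only [pv_get?_of_mem_keys (PySem.Dict.ofList summary) a [] ha']
    rw [PySem.List.foldl_congr_mem _ _
        (fun acc2 model => acc2 ++ [(a, model,
          (PySem.Dict.ofList ((PySem.Dict.ofList summary).getD a [])).getD model [])]) _ ?_]
    · rw [PySem.List.foldl_append_singleton_eq_map]
      rfl
    · intro acc2 m hm
      have hm' : m ∈ (PySem.Dict.ofList ((PySem.Dict.ofList summary).getD a [])).keys :=
        (PySem.List.mem_sorted _ _ _ _).mp hm
      simp only [pv_get?_of_mem_keys _ m [] hm']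

theorem pvFlat_eq (summary : List (String × List (String × List (String × Int)))) :
    ((PySem.Dict.ofList summary).items.foldl (fun acc p =>
      acc ++ (PySem.Dict.ofList p.2).items.map (fun q => (p.1, q.1, q.2))) []) =
      (PySem.Dict.ofList summary).keys.flatMap (pvBlk0 (PySem.Dict.ofList summary)) := by
  rw [PySem.List.foldl_append_eq_flatMap, List.nil_append,
      PySem.Dict.items_eq_map_keys _ (PySem.Dict.nodup_keys_ofList summary) [],
      List.flatMap_map]
  congr 1
  funext a
  unfold pvBlk0
  rw [PySem.Dict.items_eq_map_keys _ (PySem.Dict.nodup_keys_ofList _) [], List.map_map]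
  rfl

theorem pvPerm (summary : List (String × List (String × List (String × Int)))) :
    ((pvSortAgents (PySem.Dict.ofList summary).keys).flatMap (pvBlk (PySem.Dict.ofList summary))).Perm
      ((PySem.Dict.ofList summary).keys.flatMap (pvBlk0 (PySem.Dict.ofList summary))) := by
  refine List.Perm.flatMap (PySem.List.sorted_perm _ _ _) ?_
  intro a _
  unfold pvBlk pvBlk0
  exact (PySem.List.sorted_perm _ _ _).map _

theorem pvPairwise (summary : List (String × List (String × List (String × Int)))) :
    ((pvSortAgents (PySem.Dict.ofList summary).keys).flatMap (pvBlk (PySem.Dict.ofList summary))).Pairwise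
      (fun x y => pvTripleKey x < pvTripleKey y) := by
  rw [List.pairwise_flatMap]
  constructor
  · intro a _
    unfold pvBlk
    rw [List.pairwise_map]
    have h1 := PySem.List.sorted_pairwise
      (PySem.Dict.ofList ((PySem.Dict.ofList summary).getD a [])).keys (fun m => m)
    have h2 : (PySem.List.sorted
        (PySem.Dict.ofList ((PySem.Dict.ofList summary).getD a [])).keys (fun m => m)).Nodup :=
      ((PySem.List.sorted_perm _ _ _).nodup_iff).mpr (PySem.Dict.nodup_keys_ofList _)
    refine (h1.and h2).imp ?_
    rintro m m' ⟨hle, hne⟩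
    exact Prod.Lex.lt_iff.mpr (Or.inr ⟨rfl,
      Prod.Lex.lt_iff.mpr (Or.inr ⟨rfl, lt_of_le_of_ne hle hne⟩)⟩)
  · have h1 := PySem.List.sorted_pairwise (PySem.Dict.ofList summary).keys pvAgentKey
    have h2 : (PySem.List.sorted (PySem.Dict.ofList summary).keys pvAgentKey).Nodup :=
      ((PySem.List.sorted_perm _ _ _).nodup_iff).mpr (PySem.Dict.nodup_keys_ofList _)
    refine (h1.and h2).imp ?_
    rintro a a' ⟨hle, hne⟩ x hx y hy
    rcases List.mem_map.mp hx with ⟨m, _, rfl⟩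
    rcases List.mem_map.mp hy with ⟨m', _, rfl⟩
    rcases Prod.Lex.le_iff.mp hle with hlt | ⟨heq, hle2⟩
    · exact Prod.Lex.lt_iff.mpr (Or.inl hlt)
    · exact Prod.Lex.lt_iff.mpr (Or.inr ⟨heq,
        Prod.Lex.lt_iff.mpr (Or.inl (lt_of_le_of_ne hle2 hne))⟩)

-- ===== VERDICT (by name: the statement is the Claim_ definition above) =====
theorem iter_agent_models_py_spec : Claim_equal_iter_agent_models_py := by
  intro summary _
  show iter_agent_models_py summary =
    PySem.List.sorted ((PySem.Dict.ofList summary).items.foldl (fun acc p =>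
      acc ++ (PySem.Dict.ofList p.2).items.map (fun q => (p.1, q.1, q.2))) []) pvTripleKey
  rw [pvFlat_eq]
  rw [PySem.List.sorted_eq_of_perm_of_pairwise_lt _ _ _ (pvPerm summary) (pvPairwise summary)]
  exact pvA_eq summary
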